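-- pv_equiv track=rewrite | github.com/golam-m-hossain/anubadok | anubadok/en_pp.py | process_for_noun_concatenation
-- ===== SOURCE A (Python) =====
-- def process_for_noun_concatenation(noun_tag_1: str, noun_tag_2: str, sentence_input: list) -> list:
--     """
--     Concatenate successive proper nouns (e.g., "Golam Mortuza Hossain" => "Golam.Mortuza.Hossain")
--     """
--     sentence_output = []
--     word_position = 0
--     last_NP_position = 0
--     word_NP_ind = False
--
--     for sts in sentence_input:
--         wds_array = sts.split('\t')
--         wds_array.extend([''] * (3 - len(wds_array)))  # Ensure at least 3 elements
--
--         if wds_array[1] == noun_tag_1 or wds_array[1] == noun_tag_2: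
--             if not word_NP_ind:
--                 last_NP_position = word_position
--                 sentence_output.append(sts)
--                 word_NP_ind = True
--             else:
--                 ppst = sentence_output[last_NP_position]
--                 wds_tmp_array = ppst.split('\t')
--
--                 ppst = (
--                     f"{wds_tmp_array[0]}.{wds_array[0]}\t"
--                     f"{noun_tag_1}\t"
--                     f"{wds_tmp_array[0].lower()}.{wds_array[0].lower()}"
--                 )
--
--                 # Replace the first noun with concatenated version
--                 sentence_output[last_NP_position] = ppst
--                 word_position -= 1  # adjust position counter
--         else:
--             sentence_output.append(sts)
--             word_NP_ind = False  # reset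
--
--         word_position += 1
--
--     return sentence_output
-- ===== SOURCE B (Python) =====
-- def process_for_noun_concatenation(noun_tag_1: str, noun_tag_2: str, sentence_input: list) -> list:
--     """
--     Concatenate successive proper nouns (e.g., "Golam Mortuza Hossain" => "Golam.Mortuza.Hossain")
--     Run-buffering rewrite: collect each maximal run of proper-noun tokens and emit it
--     in one flush, instead of repeatedly re-splitting and patching the output in place.
--     """
--     out = []
--     run = []  # (first_field, original_token) pairs of the current proper-noun run
--
--     def flush():
--         if len(run) == 1:
--             out.append(run[0][1])
--         elif run:
--             out.append('.'.join(f for f, _ in run)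
--                        + '\t' + noun_tag_1 + '\t'
--                        + '.'.join(f.lower() for f, _ in run))
--         run.clear()
--
--     for sts in sentence_input:
--         fields = sts.split('\t')
--         fields += [''] * (3 - len(fields))
--         if fields[1] == noun_tag_1 or fields[1] == noun_tag_2:
--             run.append((fields[0], sts))
--         else:
--             flush()
--             out.append(sts)
--     flush()
--     return out
-- ===== Notes on version B (the rewrite author's own statement) =====
-- stated objective: simpler
-- what changed: B buffers each maximal run of proper-noun tokens as (first_field, token) pairs and emits the dotted merge in a single flush, removing A's word_position/last_NP_position counters, the re-splitting of the partially merged token, and the in-place patching of the output list.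
import Mathlib
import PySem

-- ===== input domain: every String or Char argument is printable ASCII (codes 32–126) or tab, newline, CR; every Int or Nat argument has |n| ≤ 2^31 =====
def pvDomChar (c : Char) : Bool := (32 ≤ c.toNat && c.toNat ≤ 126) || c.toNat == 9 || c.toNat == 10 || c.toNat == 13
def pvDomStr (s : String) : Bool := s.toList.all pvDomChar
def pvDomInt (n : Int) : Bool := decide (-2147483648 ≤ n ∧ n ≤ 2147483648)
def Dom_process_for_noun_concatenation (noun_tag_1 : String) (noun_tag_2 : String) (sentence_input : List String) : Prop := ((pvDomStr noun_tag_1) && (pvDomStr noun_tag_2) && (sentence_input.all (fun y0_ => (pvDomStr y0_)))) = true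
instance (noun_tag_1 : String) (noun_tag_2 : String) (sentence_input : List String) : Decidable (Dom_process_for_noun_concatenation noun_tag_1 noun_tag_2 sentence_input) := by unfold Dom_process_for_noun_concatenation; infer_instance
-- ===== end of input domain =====

-- B replaces A's word_position/last_NP_position counters and in-place patching of the output
-- by a run buffer flushed once per maximal proper-noun run (objective: simpler).

-- shared helper: sts.split('\t') padded with '' to at least 3 fields (both Pythons have these two lines)
def pvFields (s : String) : List (List Char) :=
  let w := PySem.Chars.splitOn s.toList ['\t']
  w ++ List.replicate (3 - w.length) []

-- ===== PORT A =====
-- the loop state is (sentence_output, word_position, last_NP_position, word_NP_ind);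
-- out[last_NP_position] read/write is ported with pyGetD/pySetD: the index is always in
-- range when Python reaches it (last_NP_position marks the run head inside the output),
-- so Python never raises here and the total forms are exact.
def pvStepA (noun_tag_1 : String) (noun_tag_2 : String)
    (st : List String × Int × Int × Bool) (sts : String) :
    List String × Int × Int × Bool :=
  let (out, wp, lnp, ind) := st
  let wds := pvFields sts
  if PySem.List.pyGetD wds 1 [] = noun_tag_1.toList ∨ PySem.List.pyGetD wds 1 [] = noun_tag_2.toList then
    if ind = false then
      (out ++ [sts], wp + 1, wp, true)
    else
      let ppst := PySem.List.pyGetD out lnp ""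
      let tmp := PySem.Chars.splitOn ppst.toList ['\t']
      let ppst' := String.ofList
        (PySem.List.pyGetD tmp 0 [] ++ '.' :: PySem.List.pyGetD wds 0 [] ++
         '\t' :: noun_tag_1.toList ++
         '\t' :: PySem.Chars.lower (PySem.List.pyGetD tmp 0 []) ++ '.' :: PySem.Chars.lower (PySem.List.pyGetD wds 0 []))
      (PySem.List.pySetD out lnp ppst', (wp - 1) + 1, lnp, ind)
  else
    (out ++ [sts], wp + 1, lnp, false)

def process_for_noun_concatenation (noun_tag_1 : String) (noun_tag_2 : String) (sentence_input : List String) : List String :=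
  (sentence_input.foldl (pvStepA noun_tag_1 noun_tag_2) ([], 0, 0, false)).1

-- ===== PORT B =====
-- flush(): emit the buffered run (first_field, original_token) as one token
def pvFlush (noun_tag_1 : String) (run : List (List Char × String)) : List String :=
  match run with
  | [] => []
  | [(_, o)] => [o]
  | _ => [String.ofList
      (PySem.Chars.join ['.'] (run.map (·.1)) ++
       '\t' :: noun_tag_1.toList ++
       '\t' :: PySem.Chars.join ['.'] (run.map (fun p => PySem.Chars.lower p.1)))]

def pvStepB (noun_tag_1 : String) (noun_tag_2 : String)
    (st : List String × List (List Char × String)) (sts : String) :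
    List String × List (List Char × String) :=
  let (out, run) := st
  let fields := pvFields sts
  if PySem.List.pyGetD fields 1 [] = noun_tag_1.toList ∨ PySem.List.pyGetD fields 1 [] = noun_tag_2.toList then
    (out, run ++ [(PySem.List.pyGetD fields 0 [], sts)])
  else
    (out ++ pvFlush noun_tag_1 run ++ [sts], [])

def process_for_noun_concatenation_alt (noun_tag_1 : String) (noun_tag_2 : String) (sentence_input : List String) : List String :=
  let fin := sentence_input.foldl (pvStepB noun_tag_1 noun_tag_2) ([], [])
  fin.1 ++ pvFlush noun_tag_1 fin.2

-- ===== PRECONDITION & SPEC =====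
def Spec_process_for_noun_concatenation (noun_tag_1 : String) (noun_tag_2 : String) (sentence_input : List String) (out : List String) : Prop := out = process_for_noun_concatenation_alt noun_tag_1 noun_tag_2 sentence_input
instance (noun_tag_1 : String) (noun_tag_2 : String) (sentence_input : List String) (out : List String) : Decidable (Spec_process_for_noun_concatenation noun_tag_1 noun_tag_2 sentence_input out) := by unfold Spec_process_for_noun_concatenation; infer_instance

-- ===== CLAIM (what is proved, stated in full; the proofs are below) =====
def Claim_equal_process_for_noun_concatenation : Prop := ∀ (noun_tag_1 : String) (noun_tag_2 : String) (sentence_input : List String), Dom_process_for_noun_concatenation noun_tag_1 noun_tag_2 sentence_input → Spec_process_for_noun_concatenation noun_tag_1 noun_tag_2 sentence_input (process_for_noun_concatenation noun_tag_1 noun_tag_2 sentence_input)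

-- ===== LEMMAS AND PROOFS =====

-- a direct recursive model of s.split('\t') (cur = reversed current field)
def pvSplit : List Char → List Char → List (List Char)
  | [], cur => [cur.reverse]
  | c :: rest, cur => if c = '\t' then cur.reverse :: pvSplit rest [] else pvSplit rest (c :: cur)

theorem pvSplit_go (fuel : Nat) : ∀ (l cur : List Char) (acc : List (List Char)),
    l.length < fuel →
    PySem.Chars.splitOn.go ['\t'] fuel l cur acc = acc.reverse ++ pvSplit l cur := by
  induction fuel with
  | zero => intro l cur acc h; omega
  | succ fuel ih =>
    intro l cur acc h
    cases l with
    | nil => simp [PySem.Chars.splitOn.go, pvSplit]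
    | cons c rest =>
      by_cases hc : c = '\t'
      · subst hc
        simp only [PySem.Chars.splitOn.go, List.isPrefixOf, BEq.rfl, Bool.true_and,
          if_true, List.drop_succ_cons, List.length_nil,
          List.drop_zero, List.length_cons] at *
        rw [ih rest [] (cur.reverse :: acc) (by omega)]
        simp [pvSplit]
      · have hpre : List.isPrefixOf ['\t'] (c :: rest) = false := by
          simp [List.isPrefixOf]; exact fun h' => hc h'.symm
        simp only [PySem.Chars.splitOn.go, hpre, Bool.false_eq_true,
          if_false, List.length_cons] at *
        rw [ih rest (c :: cur) acc (by omega)]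
        simp [pvSplit, hc]

theorem splitOn_eq_pvSplit (l : List Char) :
    PySem.Chars.splitOn l ['\t'] = pvSplit l [] := by
  unfold PySem.Chars.splitOn
  rw [pvSplit_go (l.length + 1) l [] [] (by omega)]
  simp

theorem pvSplit_append_tab (x : List Char) (h : '\t' ∉ x) (r : List Char) :
    ∀ cur, pvSplit (x ++ '\t' :: r) cur = (cur.reverse ++ x) :: pvSplit r [] := by
  induction x with
  | nil => intro cur; simp [pvSplit]
  | cons c rest ih =>
    intro cur
    have hc : c ≠ '\t' := fun hc => h (hc ▸ List.mem_cons_self)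
    simp only [List.cons_append, pvSplit, if_neg hc]
    rw [ih (fun hm => h (List.mem_cons_of_mem _ hm)) (c :: cur)]
    simp

theorem pvSplit_ne_nil (l cur : List Char) : pvSplit l cur ≠ [] := by
  induction l generalizing cur with
  | nil => simp [pvSplit]
  | cons c rest ih =>
    simp only [pvSplit]
    split_ifs
    · simp
    · exact ih _

theorem pvSplit_head_no_tab (l : List Char) : ∀ cur, '\t' ∉ cur →
    '\t' ∉ (pvSplit l cur).headD [] ∧ (pvSplit l cur).headD [] = cur.reverse ++ l.takeWhile (· ≠ '\t') := by
  induction l with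
  | nil => intro cur h; simp [pvSplit]; simpa using h
  | cons c rest ih =>
    intro cur h
    by_cases hc : c = '\t'
    · subst hc; simp [pvSplit, List.takeWhile]; simpa using h
    · simp only [pvSplit, if_neg hc]
      have := ih (c :: cur) (by simp [h, Ne.symm hc])
      simpa [List.takeWhile, hc] using this

-- first field of a token: head of its tab-split
def pvFirst (s : String) : List Char := (PySem.Chars.splitOn s.toList ['\t']).headD []

theorem pvFirst_no_tab (s : String) : '\t' ∉ pvFirst s := by
  unfold pvFirst
  rw [splitOn_eq_pvSplit]
  exact (pvSplit_head_no_tab s.toList [] (by simp)).1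

theorem pyGetD_fields_zero (s : String) : PySem.List.pyGetD (pvFields s) 0 [] = pvFirst s := by
  unfold pvFields pvFirst
  rw [PySem.List.pyGetD_zero]
  cases h : PySem.Chars.splitOn s.toList ['\t'] with
  | nil => exact absurd (splitOn_eq_pvSplit s.toList ▸ h) (pvSplit_ne_nil _ _)
  | cons a l => simp

-- join with '.' distributes over a snoc (nonempty list) and over lowercasing
theorem join_snoc (l : List (List Char)) (hl : l ≠ []) (x : List Char) :
    PySem.Chars.join ['.'] (l ++ [x]) = PySem.Chars.join ['.'] l ++ '.' :: x := by
  induction l with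
  | nil => exact absurd rfl hl
  | cons a t ih =>
    cases t with
    | nil => simp [PySem.Chars.join_cons_cons, PySem.Chars.join_singleton]
    | cons b u =>
      have ih' := ih (by simp)
      simp only [List.cons_append] at ih' ⊢
      rw [PySem.Chars.join_cons_cons, ih', PySem.Chars.join_cons_cons]
      simp

theorem join_no_tab (l : List (List Char)) (h : ∀ x ∈ l, '\t' ∉ x) :
    '\t' ∉ PySem.Chars.join ['.'] l := by
  induction l with
  | nil => simp [PySem.Chars.join_nil]
  | cons a t ih =>
    cases t with
    | nil => simpa [PySem.Chars.join_singleton] using h a (by simp)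
    | cons b u =>
      rw [PySem.Chars.join_cons_cons]
      intro hm
      rcases List.mem_append.1 hm with hm | hm
      · rcases List.mem_append.1 hm with hm | hm
        · exact h a (by simp) hm
        · simp at hm
      · exact ih (fun x hx => h x (List.mem_cons_of_mem _ hx)) hm

theorem lower_join (l : List (List Char)) :
    PySem.Chars.lower (PySem.Chars.join ['.'] l) = PySem.Chars.join ['.'] (l.map PySem.Chars.lower) := by
  induction l with
  | nil => simp [PySem.Chars.join_nil, PySem.Chars.lower]
  | cons a t ih =>
    cases t with
    | nil => simp [PySem.Chars.join_singleton]
    | cons b u =>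
      have hdot : PySem.Chars.lowerChar '.' = '.' := by decide
      rw [PySem.Chars.join_cons_cons, List.map_cons, List.map_cons, PySem.Chars.join_cons_cons]
      simp only [PySem.Chars.lower] at ih ⊢
      rw [List.map_append, List.map_append, ih]
      simp [hdot]
      rfl

-- well-formedness of B's run buffer: each stored first field really is the token's
-- first tab-split field (hence tab-free)
def pvWF (run : List (List Char × String)) : Prop :=
  ∀ p ∈ run, '\t' ∉ p.1 ∧ p.1 = pvFirst p.2

-- the flush of a nonempty run is one token whose first tab-split field is the dotted surface
theorem pvFlush_cons (nt1 : String) (p : List Char × String) (run : List (List Char × String))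
    (hwf : pvWF (p :: run)) :
    ∃ rep : String, pvFlush nt1 (p :: run) = [rep] ∧
      pvFirst rep = PySem.Chars.join ['.'] ((p :: run).map (·.1)) := by
  cases run with
  | nil =>
    refine ⟨p.2, rfl, ?_⟩
    simp only [List.map_cons, List.map_nil, PySem.Chars.join_singleton]
    exact ((hwf p (by simp)).2).symm
  | cons q t =>
    refine ⟨_, rfl, ?_⟩
    have htf : '\t' ∉ PySem.Chars.join ['.'] ((p :: q :: t).map (·.1)) :=
      join_no_tab _ (by intro x hx; rcases List.mem_map.1 hx with ⟨y, hy, rfl⟩; exact (hwf y hy).1)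
    unfold pvFirst
    rw [String.toList_ofList, splitOn_eq_pvSplit]
    simp only [List.append_assoc, List.cons_append]
    rw [pvSplit_append_tab (PySem.Chars.join ['.'] ((p :: q :: t).map (·.1))) htf _ []]
    simp

-- reading/patching the run head at the end of the output
theorem pyGetD_append_len (e : List String) (r : String) :
    PySem.List.pyGetD (e ++ [r]) ((e.length : Nat) : Int) "" = r := by
  rw [PySem.List.pyGetD_natCast]
  simp [List.getD]

theorem pySetD_append_len (e : List String) (r r' : String) :
    PySem.List.pySetD (e ++ [r]) ((e.length : Nat) : Int) r' = e ++ [r'] := by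
  rw [PySem.List.pySetD_natCast, List.set_append_right _ _ (by omega)]
  simp

theorem pyGetD_splitOn_zero (s : String) :
    PySem.List.pyGetD (PySem.Chars.splitOn s.toList ['\t']) 0 [] = pvFirst s := by
  unfold pvFirst
  rw [PySem.List.pyGetD_zero]
  cases h : PySem.Chars.splitOn s.toList ['\t'] with
  | nil => exact absurd (splitOn_eq_pvSplit s.toList ▸ h) (pvSplit_ne_nil _ _)
  | cons a l => simp

theorem pvFlush_nil (nt1 : String) : pvFlush nt1 [] = [] := rfl

theorem pvFlush_one (nt1 : String) (f : List Char) (o : String) : pvFlush nt1 [(f, o)] = [o] := rfl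

theorem pvFlush_two (nt1 : String) (a b : List Char × String) (l : List (List Char × String)) :
    pvFlush nt1 (a :: b :: l) = [String.ofList
      (PySem.Chars.join ['.'] ((a :: b :: l).map (·.1)) ++
       '\t' :: nt1.toList ++
       '\t' :: PySem.Chars.join ['.'] ((a :: b :: l).map (fun p => PySem.Chars.lower p.1)))] := rfl

-- flushing a run extended by one more noun = A's in-place concatenation step
theorem pvFlush_snoc (nt1 : String) (p : List Char × String) (run : List (List Char × String))
    (hwf : pvWF (p :: run)) (rep : String)
    (hfirst : pvFirst rep = PySem.Chars.join ['.'] ((p :: run).map (·.1))) (f : List Char) (sts : String) :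
    pvFlush nt1 ((p :: run) ++ [(f, sts)]) = [String.ofList
      (pvFirst rep ++ '.' :: f ++ '\t' :: nt1.toList ++
       '\t' :: PySem.Chars.lower (pvFirst rep) ++ '.' :: PySem.Chars.lower f)] := by
  have h1 : PySem.Chars.join ['.'] (((p :: run) ++ [(f, sts)]).map (·.1))
      = pvFirst rep ++ '.' :: f := by
    rw [List.map_append, hfirst]
    simp only [List.map_cons, List.map_nil]
    rw [join_snoc _ (by simp) _]
  have h2 : PySem.Chars.join ['.'] (((p :: run) ++ [(f, sts)]).map (fun p => PySem.Chars.lower p.1))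
      = PySem.Chars.lower (pvFirst rep) ++ '.' :: PySem.Chars.lower f := by
    rw [List.map_append]
    simp only [List.map_cons, List.map_nil]
    rw [join_snoc _ (by simp) _, hfirst, lower_join]
    simp [List.map_map, Function.comp_def]
  rcases run with _ | ⟨q, t⟩
  all_goals simp only [List.cons_append, List.nil_append] at h1 h2 ⊢
  all_goals rw [pvFlush_two, h1, h2]
  all_goals try simp [List.append_assoc]

-- the loop invariant: A's folded state vs B's (emitted, run)
theorem pv_loop (nt1 nt2 : String) : ∀ (rest : List String) (emitted : List String)
    (run : List (List Char × String)) (wp lnp : Int),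
    pvWF run →
    wp = (emitted.length : Int) + ((pvFlush nt1 run).length : Int) →
    (run ≠ [] → lnp = (emitted.length : Int)) →
    (rest.foldl (pvStepA nt1 nt2) (emitted ++ pvFlush nt1 run, wp, lnp, !run.isEmpty)).1
      = (rest.foldl (pvStepB nt1 nt2) (emitted, run)).1 ++
        pvFlush nt1 (rest.foldl (pvStepB nt1 nt2) (emitted, run)).2 := by
  intro rest
  induction rest with
  | nil =>
    intro emitted run wp lnp _ _ _
    simp
  | cons sts rest ih =>
    intro emitted run wp lnp hwf hwp hlnp
    simp only [List.foldl_cons]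
    by_cases hn : PySem.List.pyGetD (pvFields sts) 1 [] = nt1.toList ∨
        PySem.List.pyGetD (pvFields sts) 1 [] = nt2.toList
    · cases run with
      | nil =>
        -- run starts: A appends sts, B buffers it
        have hstepA : pvStepA nt1 nt2 (emitted ++ pvFlush nt1 [], wp, lnp,
            !(([] : List (List Char × String)).isEmpty)) sts
            = (emitted ++ [sts], wp + 1, wp, true) := by
          simp [pvStepA, hn, pvFlush_nil]
        have hstepB : pvStepB nt1 nt2 (emitted, ([] : List (List Char × String))) sts
            = (emitted, [(PySem.List.pyGetD (pvFields sts) 0 [], sts)]) := by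
          simp [pvStepB, hn]
        rw [hstepA, hstepB]
        have hwp' : wp = (emitted.length : Int) := by simpa [pvFlush_nil] using hwp
        have := ih emitted [(PySem.List.pyGetD (pvFields sts) 0 [], sts)] (wp + 1) wp
          (by intro x hx; simp at hx; subst hx
              rw [pyGetD_fields_zero]
              exact ⟨pvFirst_no_tab sts, rfl⟩)
          (by simp [pvFlush_one, hwp'])
          (by intro _; exact hwp')
        simpa [pvFlush_one] using this
      | cons p prun =>
        -- run continues: A patches out[last_NP_position], B extends the buffer
        obtain ⟨rep, hrep, hfirst⟩ := pvFlush_cons nt1 p prun hwf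
        have hlnp' : lnp = (emitted.length : Int) := hlnp (by simp)
        have hflush := pvFlush_snoc nt1 p prun hwf rep hfirst (PySem.List.pyGetD (pvFields sts) 0 []) sts
        have hstepA : pvStepA nt1 nt2 (emitted ++ pvFlush nt1 (p :: prun), wp, lnp,
            !((p :: prun).isEmpty)) sts
            = (emitted ++ pvFlush nt1 ((p :: prun) ++ [(PySem.List.pyGetD (pvFields sts) 0 [], sts)]),
               (wp - 1) + 1, lnp, true) := by
          rw [hrep, hlnp', hflush]
          simp only [pvStepA, List.isEmpty_cons, Bool.not_false, if_pos hn,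
            Bool.true_eq_false, if_false]
          rw [pyGetD_append_len, pyGetD_splitOn_zero, pySetD_append_len]
        have hstepB : pvStepB nt1 nt2 (emitted, p :: prun) sts
            = (emitted, (p :: prun) ++ [(PySem.List.pyGetD (pvFields sts) 0 [], sts)]) := by
          simp [pvStepB, hn]
        rw [hstepA, hstepB]
        have hwf' : pvWF ((p :: prun) ++ [(PySem.List.pyGetD (pvFields sts) 0 [], sts)]) := by
          intro x hx
          rcases List.mem_append.1 hx with hx | hx
          · exact hwf x hx
          · simp at hx; subst hx
            rw [pyGetD_fields_zero]
            exact ⟨pvFirst_no_tab sts, rfl⟩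
        have := ih emitted ((p :: prun) ++ [(PySem.List.pyGetD (pvFields sts) 0 [], sts)])
          ((wp - 1) + 1) lnp hwf'
          (by rw [hflush]; rw [hrep] at hwp; simp at hwp ⊢; omega)
          (by intro _; exact hlnp')
        simpa using this
    · -- not a noun: A appends and resets, B flushes then appends
      have hstepA : pvStepA nt1 nt2 (emitted ++ pvFlush nt1 run, wp, lnp, !run.isEmpty) sts
          = ((emitted ++ pvFlush nt1 run) ++ [sts], wp + 1, lnp, false) := by
        simp [pvStepA, hn]
      have hstepB : pvStepB nt1 nt2 (emitted, run) sts
          = (emitted ++ pvFlush nt1 run ++ [sts], []) := by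
        simp [pvStepB, hn]
      rw [hstepA, hstepB]
      have := ih (emitted ++ pvFlush nt1 run ++ [sts]) [] (wp + 1) lnp
        (by intro x hx; simp at hx)
        (by rw [hwp, pvFlush_nil]; simp [List.length_append]; omega)
        (by intro h; exact absurd rfl h)
      simpa [pvFlush_nil] using this

-- ===== VERDICT (by name: the statement is the Claim_ definition above) =====
theorem process_for_noun_concatenation_spec : Claim_equal_process_for_noun_concatenation := by
  intro nt1 nt2 input _
  unfold Spec_process_for_noun_concatenation process_for_noun_concatenation process_for_noun_concatenation_alt
  have := pv_loop nt1 nt2 input [] [] 0 0 (by intro p hp; simp at hp) (by simp [pvFlush_nil]) (by intro h; exact absurd rfl h)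
  simpa [pvFlush_nil] using this
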